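-- pv_equiv track=rewrite | github.com/aidanpb9/doom-agent | maps/tools/navigation_planner.py | _expand_sector_set
-- ===== SOURCE A (Python) =====
-- def _expand_sector_set(seed: set[int], adj: dict[int, list[int]], depth: int = 1) -> set[int]:
--     cur = set(seed)
--     frontier = set(seed)
--     for _ in range(depth):
--         nxt = set()
--         for s in frontier:
--             for nb in adj.get(s, []):
--                 if nb not in cur:
--                     nxt.add(nb)
--         if not nxt:
--             break
--         cur |= nxt
--         frontier = nxt
--     return cur
-- ===== SOURCE B (Python) =====
-- def _expand_sector_set(seed: set[int], adj: dict[int, list[int]], depth: int = 1) -> set[int]: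
--     # Walk-layer expansion: each round the NEXT layer is the deduplicated list of
--     # neighbors of ALL current layer nodes (revisits included); the fresh ones are
--     # appended to the result. No frontier of only-new nodes is maintained.
--     out = dict.fromkeys(seed)
--     layer = list(out)
--     for _ in range(depth):
--         layer = list(dict.fromkeys(v for u in layer for v in adj.get(u, [])))
--         fresh = [v for v in layer if v not in out]
--         if not fresh:
--             break
--         out.update(dict.fromkeys(fresh))
--     return set(out)
-- ===== Notes on version B (the rewrite author's own statement) =====
-- stated objective: alternative
-- what changed: Replaced the frontier-of-newly-discovered-nodes BFS (cur/frontier sets, per-node visited check while generating) by walk-layer iteration: each round the whole next layer is recomputed as the deduplicated neighbor list of ALL current layer nodes (revisits included), and the fresh elements of that layer are appended to the result; no frontier of only-new nodes is carried.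
import Mathlib
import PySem

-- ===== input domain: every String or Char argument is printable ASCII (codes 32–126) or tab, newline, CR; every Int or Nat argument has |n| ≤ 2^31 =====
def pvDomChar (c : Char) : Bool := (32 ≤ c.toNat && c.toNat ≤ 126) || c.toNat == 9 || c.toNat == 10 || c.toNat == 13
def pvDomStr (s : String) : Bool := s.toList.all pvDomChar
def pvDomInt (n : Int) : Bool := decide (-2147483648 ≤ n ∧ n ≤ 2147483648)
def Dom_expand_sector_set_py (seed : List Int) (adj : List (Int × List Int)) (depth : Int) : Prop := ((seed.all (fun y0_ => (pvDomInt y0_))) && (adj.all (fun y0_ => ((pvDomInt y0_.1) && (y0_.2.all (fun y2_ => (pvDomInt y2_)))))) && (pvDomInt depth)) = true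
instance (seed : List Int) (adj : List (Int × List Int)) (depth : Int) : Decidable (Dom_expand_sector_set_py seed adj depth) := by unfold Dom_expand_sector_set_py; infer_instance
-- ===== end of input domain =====

-- B replaces A's frontier-of-new-nodes BFS by walk-layer iteration (next layer =
-- deduplicated neighbors of ALL current layer nodes); alternative decomposition,
-- same return value (the Python output is a set; ports use the insertion-order model).

-- ===== PORT A =====
-- Python 'adj.get(s, [])' on the dict encoded by the association list
def pvAdjGet (adj : List (Int × List Int)) (s : Int) : List Int :=
  PySem.Dict.getD ⟨adj⟩ s []

-- one round: 'nxt = set(); for s in frontier: for nb in adj.get(s, []): if nb not in cur: nxt.add(nb)'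
def pvLevelA (adj : List (Int × List Int)) (cur : List Int) (frontier : List Int) : List Int :=
  frontier.foldl (fun nxt s =>
    (pvAdjGet adj s).foldl (fun nxt nb =>
      if nb ∈ cur then nxt else PySem.Set.add nxt nb) nxt) PySem.Set.empty

-- 'for _ in range(depth): … ; if not nxt: break; cur |= nxt; frontier = nxt'
def pvLoopA (adj : List (Int × List Int)) : Nat → List Int → List Int → List Int
  | 0, cur, _ => cur
  | k + 1, cur, frontier =>
      let nxt := pvLevelA adj cur frontier
      if nxt = [] then cur
      else pvLoopA adj k (PySem.Set.union cur nxt) nxt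

def expand_sector_set_py (seed : List Int) (adj : List (Int × List Int)) (depth : Int) : List Int :=
  pvLoopA adj depth.toNat (PySem.Set.ofList seed) (PySem.Set.ofList seed)

-- ===== PORT B =====
-- 'layer = list(dict.fromkeys(v for u in layer for v in adj.get(u, [])));
--  fresh = [v for v in layer if v not in out]; if not fresh: break; out.update(dict.fromkeys(fresh))'
def pvRoundsB (adj : List (Int × List Int)) : Nat → List Int → List Int → List Int
  | 0, out, _ => out
  | k + 1, out, layer =>
      let layer' := PySem.Set.ofList (layer.flatMap (pvAdjGet adj))
      let fresh := layer'.filter (fun v => decide (v ∉ out))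
      if fresh = [] then out
      else pvRoundsB adj k (PySem.Set.update out fresh) layer'

def expand_sector_set_py_alt (seed : List Int) (adj : List (Int × List Int)) (depth : Int) : List Int :=
  let out := PySem.Set.ofList seed
  pvRoundsB adj depth.toNat out out

-- ===== PRECONDITION & SPEC =====
def Spec_expand_sector_set_py (seed : List Int) (adj : List (Int × List Int)) (depth : Int) (out : List Int) : Prop := out = expand_sector_set_py_alt seed adj depth
instance (seed : List Int) (adj : List (Int × List Int)) (depth : Int) (out : List Int) : Decidable (Spec_expand_sector_set_py seed adj depth out) := by unfold Spec_expand_sector_set_py; infer_instance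

-- ===== CLAIM (what is proved, stated in full; the proofs are below) =====
def Claim_equal_expand_sector_set_py : Prop := ∀ (seed : List Int) (adj : List (Int × List Int)) (depth : Int), Dom_expand_sector_set_py seed adj depth → Spec_expand_sector_set_py seed adj depth (expand_sector_set_py seed adj depth)

-- ===== LEMMAS AND PROOFS =====

-- A's inner conditional-add fold is a fold of Set.add over the filtered list
theorem pvInnerA_eq (cur : List Int) (l : List Int) : ∀ acc : List Int,
    l.foldl (fun nxt nb => if nb ∈ cur then nxt else PySem.Set.add nxt nb) acc
      = (l.filter (fun v => decide (v ∉ cur))).foldl PySem.Set.add acc := by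
  induction l with
  | nil => intro acc; rfl
  | cons nb l ih =>
      intro acc
      by_cases h : nb ∈ cur <;> simp [h, ih]

-- A's level computation = set comprehension over the filtered flatMap of the frontier
theorem pvLevelA_eq (adj : List (Int × List Int)) (cur : List Int) (frontier : List Int) :
    pvLevelA adj cur frontier
      = PySem.Set.ofList ((frontier.flatMap (pvAdjGet adj)).filter (fun v => decide (v ∉ cur))) := by
  rw [PySem.Set.ofList_eq_foldl]
  show frontier.foldl _ PySem.Set.empty = _
  have main : ∀ (fr : List Int) (acc : List Int),
      fr.foldl (fun nxt s =>
        (pvAdjGet adj s).foldl (fun nxt nb => if nb ∈ cur then nxt else PySem.Set.add nxt nb) nxt) acc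
        = ((fr.flatMap (pvAdjGet adj)).filter (fun v => decide (v ∉ cur))).foldl PySem.Set.add acc := by
    intro fr
    induction fr with
    | nil => intro acc; rfl
    | cons s fr ih =>
        intro acc
        simp only [List.foldl_cons, List.flatMap_cons, List.filter_append, List.foldl_append]
        rw [pvInnerA_eq, ih]
  exact main frontier PySem.Set.empty

-- filtering commutes with first-occurrence deduplication (Set.add / Set.ofList)
theorem pvFilter_add (p : Int → Bool) (s : List Int) (x : Int) :
    (PySem.Set.add s x).filter p
      = if p x then PySem.Set.add (s.filter p) x else s.filter p := by
  rw [PySem.Set.add_eq_ite, PySem.Set.add_eq_ite]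
  by_cases hm : x ∈ s
  · have hmf : p x = true → x ∈ s.filter p := fun hp => List.mem_filter.2 ⟨hm, hp⟩
    by_cases hp : p x <;> simp [hm, hp, hmf]
  · have hmf : x ∉ s.filter p := fun h => hm (List.mem_filter.1 h).1
    by_cases hp : p x <;> simp [hm, hp, hmf, List.filter_append]

theorem pvFilter_ofList (p : Int → Bool) (l : List Int) : ∀ acc : List Int,
    (l.foldl PySem.Set.add acc).filter p = (l.filter p).foldl PySem.Set.add (acc.filter p) := by
  induction l with
  | nil => intro acc; rfl
  | cons x l ih =>
      intro acc
      simp only [List.foldl_cons, List.filter_cons]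
      rw [ih, pvFilter_add]
      by_cases hp : p x <;> simp [hp]

theorem pvFilter_ofList' (p : Int → Bool) (l : List Int) :
    (PySem.Set.ofList l).filter p = PySem.Set.ofList (l.filter p) := by
  rw [PySem.Set.ofList_eq_foldl, PySem.Set.ofList_eq_foldl]
  exact pvFilter_ofList p l []

-- neighbors of already-closed nodes vanish under the 'not in cur' filter, so the
-- whole layer and its fresh sub-frontier generate the same filtered neighbor stream
theorem pvFlatMap_restrict (adj : List (Int × List Int)) (prev cur : List Int)
    (hN : ∀ u ∈ prev, ∀ v ∈ pvAdjGet adj u, v ∈ cur) :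
    ∀ (layer fresh : List Int), layer.filter (fun u => decide (u ∉ prev)) = fresh →
    (layer.flatMap (pvAdjGet adj)).filter (fun v => decide (v ∉ cur))
      = (fresh.flatMap (pvAdjGet adj)).filter (fun v => decide (v ∉ cur)) := by
  intro layer
  induction layer with
  | nil => intro fresh h; rw [← h]; rfl
  | cons u layer ih =>
      intro fresh h
      simp only [List.flatMap_cons, List.filter_append]
      by_cases hu : u ∈ prev
      · have hnil : (pvAdjGet adj u).filter (fun v => decide (v ∉ cur)) = [] := by
          rw [List.filter_eq_nil_iff]
          intro v hv
          simpa using hN u hu v hv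
        rw [hnil, List.nil_append]
        apply ih
        simpa [hu] using h
      · rw [List.filter_cons_of_pos (by simpa using hu)] at h
        rw [← h, List.flatMap_cons, List.filter_append,
          ih (layer.filter (fun u => decide (u ∉ prev))) rfl]

-- main lockstep simulation of the two loops
theorem pvMain (adj : List (Int × List Int)) : ∀ (k : Nat) (prev fresh layer : List Int),
    (prev ++ fresh).Nodup →
    layer.filter (fun u => decide (u ∉ prev)) = fresh →
    (∀ u ∈ prev, ∀ v ∈ pvAdjGet adj u, v ∈ prev ++ fresh) →
    pvLoopA adj k (prev ++ fresh) fresh = pvRoundsB adj k (prev ++ fresh) layer := by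
  intro k
  induction k with
  | zero => intro prev fresh layer _ _ _; rfl
  | succ k ih =>
      intro prev fresh layer hnd hfil hN
      set cur := prev ++ fresh with hcur
      have key : pvLevelA adj cur fresh
          = (PySem.Set.ofList (layer.flatMap (pvAdjGet adj))).filter (fun v => decide (v ∉ cur)) := by
        rw [pvLevelA_eq, pvFilter_ofList',
          pvFlatMap_restrict adj prev cur hN layer fresh hfil]
      rw [pvLoopA, pvRoundsB, ← key]
      by_cases hempty : pvLevelA adj cur fresh = []
      · rw [if_pos hempty, if_pos hempty]
      · simp only [hempty, if_false]
        set nxt := pvLevelA adj cur fresh with hnxt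
        have hnxt_nodup : nxt.Nodup := by
          rw [hnxt, pvLevelA_eq]; exact PySem.Set.nodup_ofList _
        have hnxt_out : ∀ v ∈ nxt, v ∉ cur := by
          intro v hv
          rw [key] at hv
          simpa using (List.mem_filter.1 hv).2
        have happ : PySem.Set.update cur nxt = cur ++ nxt :=
          PySem.Set.update_eq_append_of_disjoint cur nxt hnxt_nodup hnxt_out
        have happ' : PySem.Set.union cur nxt = cur ++ nxt := happ
        rw [happ, happ']
        -- new invariant for the recursive call
        have hN' : ∀ u ∈ cur, ∀ v ∈ pvAdjGet adj u, v ∈ cur ++ nxt := by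
          intro u hu v hv
          rcases List.mem_append.1 hu with hup | huf
          · exact List.mem_append.2 (Or.inl (hN u hup v hv))
          · by_cases hvc : v ∈ cur
            · exact List.mem_append.2 (Or.inl hvc)
            · refine List.mem_append.2 (Or.inr ?_)
              rw [hnxt, pvLevelA_eq]
              rw [PySem.Set.mem_ofList, List.mem_filter]
              exact ⟨List.mem_flatMap.2 ⟨u, huf, hv⟩, by simpa using hvc⟩
        have hnd' : (cur ++ nxt).Nodup :=
          List.Nodup.append hnd hnxt_nodup
            (fun a ha hb => (hnxt_out a hb) ha)
        have hfil' : (PySem.Set.ofList (layer.flatMap (pvAdjGet adj))).filter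
            (fun u => decide (u ∉ cur)) = nxt := key.symm
        exact ih cur nxt (PySem.Set.ofList (layer.flatMap (pvAdjGet adj))) hnd' hfil' hN'

theorem pvFinal (seed : List Int) (adj : List (Int × List Int)) (depth : Int) :
    expand_sector_set_py seed adj depth = expand_sector_set_py_alt seed adj depth := by
  unfold expand_sector_set_py expand_sector_set_py_alt
  have h := pvMain adj depth.toNat [] (PySem.Set.ofList seed) (PySem.Set.ofList seed)
    (by simp [PySem.Set.nodup_ofList])
    (by simp)
    (by simp)
  simpa using h

-- ===== VERDICT (by name: the statement is the Claim_ definition above) =====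
theorem expand_sector_set_py_spec : Claim_equal_expand_sector_set_py := by
  intro seed adj depth _
  exact pvFinal seed adj depth
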